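-- pv_equiv track=rewrite | github.com/JHyuk2/Hyuk2Coding | SWAG/D3/6190.py | isDanjo
-- ===== SOURCE A (Python) =====
-- def isDanjo(num):
--     tmp_list = []
--     a = num
--     while num > 0:
--         tmp = num%10
--         tmp_list.append(tmp)
--         num = num // 10
--
--     for i in range(len(tmp_list)-1):
--         if tmp_list[i] < tmp_list[i+1]:
--             return a, False
--         else:
--             continue
--     return a, True
-- ===== SOURCE B (Python) =====
-- def isDanjo(num):
--     if num <= 0:
--         return num, True
--     s = str(num)
--     return num, list(s) == sorted(s)
-- ===== Notes on version B (the rewrite author's own statement) =====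
-- stated objective: simpler
-- what changed: Replaces the arithmetic modulo/floordiv digit-extraction loop plus an index-based adjacency scan with a single sort-then-compare over the decimal string: the digits are non-decreasing iff list(str(num)) equals sorted(str(num)); non-positive inputs early-return (num, True) exactly as A's never-entered loop does.
import Mathlib
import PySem

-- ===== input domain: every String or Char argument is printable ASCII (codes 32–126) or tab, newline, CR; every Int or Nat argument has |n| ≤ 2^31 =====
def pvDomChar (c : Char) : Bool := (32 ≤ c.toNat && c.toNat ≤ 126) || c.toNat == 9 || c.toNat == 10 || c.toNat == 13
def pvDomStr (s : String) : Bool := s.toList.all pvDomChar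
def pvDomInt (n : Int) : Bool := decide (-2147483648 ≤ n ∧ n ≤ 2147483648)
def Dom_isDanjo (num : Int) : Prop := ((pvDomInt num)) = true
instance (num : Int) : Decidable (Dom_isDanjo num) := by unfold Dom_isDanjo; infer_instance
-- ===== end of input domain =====

-- B replaces A's modulo/floordiv digit-extraction loop plus index adjacency scan by
-- comparing the decimal string with its sorted character list (simpler, not faster).

-- ===== PORT A =====
-- while num > 0: tmp_list.append(num % 10); num //= 10
def digitsLoopA (num : Int) (acc : List Int) : List Int :=
  if _h : 0 < num then
    digitsLoopA (PySem.Int.floordiv num 10) (acc ++ [PySem.Int.mod num 10])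
  else acc
termination_by num.toNat
decreasing_by
  rw [PySem.Int.floordiv_eq_ediv_of_pos (by norm_num)]
  omega

-- for i in range(len(tmp_list)-1): if tmp_list[i] < tmp_list[i+1]: return a, False
def checkA (l : List Int) : List Int → Bool
  | [] => true
  | i :: rest =>
    if PySem.List.pyGetD l i 0 < PySem.List.pyGetD l (i + 1) 0 then false
    else checkA l rest

def isDanjo (num : Int) : Int × Bool :=
  let a := num
  let tmpList := digitsLoopA num []
  (a, checkA tmpList (PySem.List.pyRange 0 ((tmpList.length : Int) - 1) 1))

-- ===== PORT B =====
def isDanjo_alt (num : Int) : Int × Bool :=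
  if num ≤ 0 then (num, true)
  else
    let s := PySem.Int.toStr num
    (num, decide (s.toList = PySem.List.sorted s.toList (fun c => c) false))

-- ===== PRECONDITION & SPEC =====
def Spec_isDanjo (num : Int) (out : Int × Bool) : Prop := out = isDanjo_alt num
instance (num : Int) (out : Int × Bool) : Decidable (Spec_isDanjo num out) := by unfold Spec_isDanjo; infer_instance

-- ===== CLAIM (what is proved, stated in full; the proofs are below) =====
def Claim_equal_isDanjo : Prop := ∀ (num : Int), Dom_isDanjo num → Spec_isDanjo num (isDanjo num)

-- ===== LEMMAS AND PROOFS =====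

-- A's digit loop collects the base-10 digits of num.toNat, least significant first.
theorem digitsLoopA_eq (n : Int) (acc : List Int) :
    digitsLoopA n acc = acc ++ (Nat.digits 10 n.toNat).map (fun d : Nat => (d : Int)) := by
  fun_induction digitsLoopA n acc with
  | case1 n acc h ih =>
    have hn : ((n.toNat : Nat) : Int) = n := Int.toNat_of_nonneg (le_of_lt h)
    have hfd : PySem.Int.floordiv n 10 = ((n.toNat / 10 : Nat) : Int) := by
      rw [← hn]; exact_mod_cast PySem.Int.floordiv_natCast n.toNat 10
    have hmd : PySem.Int.mod n 10 = ((n.toNat % 10 : Nat) : Int) := by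
      rw [← hn]; exact_mod_cast PySem.Int.mod_natCast n.toNat 10
    rw [ih, hfd, hmd]
    have hpos : 0 < n.toNat := by omega
    rw [Nat.digits_def' (by norm_num : (1:Nat) < 10) hpos]
    simp only [Int.toNat_natCast, List.map_cons, List.append_assoc, List.cons_append,
      List.nil_append]
  | case2 n acc h =>
    have : n.toNat = 0 := by omega
    simp [this]

-- checkA (the all-adjacent-pairs scan) phrased structurally, for the proofs below.
def chainB : List Int → Bool
  | [] => true
  | [_] => true
  | x :: y :: r => if x < y then false else chainB (y :: r)

theorem chainB_short (l : List Int) (h : l.length ≤ 1) : chainB l = true := by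
  match l, h with
  | [], _ => rfl
  | [_], _ => rfl

theorem checkA_range (l : List Int) (i : Nat) :
    checkA l (PySem.List.pyRange i ((l.length : Int) - 1) 1) = chainB (l.drop i) := by
  induction hk : l.length - i generalizing i with
  | zero =>
    rw [PySem.List.pyRange_one_eq_nil (by omega)]
    exact (chainB_short _ (by simp; omega)).symm
  | succ k ih =>
    by_cases hlast : i + 1 = l.length
    · rw [PySem.List.pyRange_one_eq_nil (by omega)]
      exact (chainB_short _ (by simp; omega)).symm
    · have h1 : i + 1 < l.length := by omega
      have h0 : i < l.length := by omega
      rw [PySem.List.pyRange_one_cons (by omega)]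
      show (if PySem.List.pyGetD l i 0 < PySem.List.pyGetD l ((i : Int) + 1) 0 then false
            else checkA l (PySem.List.pyRange ((i : Int) + 1) ((l.length : Int) - 1) 1)) = _
      have hcast : ((i : Int) + 1) = ((i + 1 : Nat) : Int) := by push_cast; ring
      rw [hcast, PySem.List.pyGetD_natCast, PySem.List.pyGetD_natCast,
          List.getD_eq_getElem l 0 h0, List.getD_eq_getElem l 0 h1,
          ih (i + 1) (by omega)]
      rw [List.drop_eq_getElem_cons h0, List.drop_eq_getElem_cons h1]
      rfl

-- chainB is exactly "non-increasing" (Pairwise ≥), by transitivity.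
theorem chainB_iff (l : List Int) : chainB l = true ↔ l.Pairwise (fun a b => b ≤ a) := by
  induction l with
  | nil => simp [chainB]
  | cons x rest ih =>
    match rest, ih with
    | [], _ => simp [chainB]
    | y :: r, ih =>
      constructor
      · intro h
        rw [chainB] at h
        split_ifs at h with hxy
        have hyr := (ih.mp h)
        refine List.Pairwise.cons ?_ hyr
        intro z hz
        rcases List.mem_cons.mp hz with rfl | hz
        · omega
        · have : z ≤ y := (List.pairwise_cons.mp hyr).1 z hz
          omega
      · intro h
        rw [chainB]
        have hxy : y ≤ x := (List.pairwise_cons.mp h).1 y (by simp)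
        rw [if_neg (by omega)]
        exact ih.mpr (List.pairwise_cons.mp h).2

-- Core's toDigits (used by str(n)) in terms of Nat.digits.
theorem toDigitsCore_eq (n : Nat) (fuel : Nat) (acc : List Char) (hn : 0 < n) (hf : n < fuel) :
    Nat.toDigitsCore 10 fuel n acc = ((Nat.digits 10 n).map Nat.digitChar).reverse ++ acc := by
  induction n using Nat.strong_induction_on generalizing fuel acc with
  | _ n ih =>
    match fuel, hf with
    | f + 1, hf =>
      rw [Nat.toDigitsCore]
      rw [Nat.digits_def' (by norm_num : (1:Nat) < 10) hn]
      by_cases hq : n / 10 = 0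
      · simp [hq]
      · rw [if_neg hq]
        have hlt : n / 10 < n := Nat.div_lt_self hn (by norm_num)
        rw [ih (n / 10) hlt f ((n % 10).digitChar :: acc) (by omega) (by omega)]
        simp

theorem toChars_pos (n : Int) (h : 0 < n) :
    PySem.Int.toChars n = ((Nat.digits 10 n.toNat).map Nat.digitChar).reverse := by
  rw [PySem.Int.toChars, if_neg (by omega), Nat.toDigits]
  rw [toDigitsCore_eq n.toNat (n.toNat + 1) [] (by omega) (by omega)]
  simp

-- digitChar is order-reflecting on digits
theorem digitChar_le_iff (d e : Nat) (hd : d < 10) (he : e < 10) :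
    Nat.digitChar d ≤ Nat.digitChar e ↔ d ≤ e := by
  interval_cases d <;> interval_cases e <;> simp <;> decide

-- the digit list (LSB first) is non-increasing iff the decimal string is sorted
theorem digits_key (m : Nat) :
    chainB ((Nat.digits 10 m).map (fun d : Nat => (d : Int)))
      = decide (((Nat.digits 10 m).map Nat.digitChar).reverse
          = PySem.List.sorted (((Nat.digits 10 m).map Nat.digitChar).reverse) (fun c => c) false) := by
  rw [Bool.eq_iff_iff, decide_eq_true_iff, chainB_iff]
  have hlt : ∀ d ∈ Nat.digits 10 m, d < 10 :=
    fun d hd => Nat.digits_lt_base (by norm_num) hd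
  constructor
  · intro h
    apply PySem.List.sorted_eq_self_of_pairwise _ _ ?_ |>.symm
    rw [List.pairwise_reverse, List.pairwise_map]
    rw [List.pairwise_map] at h
    refine h.imp_of_mem ?_
    intro a b ha hb hba
    exact (digitChar_le_iff b a (hlt b hb) (hlt a ha)).mpr (by exact_mod_cast hba)
  · intro h
    have hp := PySem.List.sorted_pairwise (((Nat.digits 10 m).map Nat.digitChar).reverse) (fun c => c)
    rw [← h, List.pairwise_reverse, List.pairwise_map] at hp
    rw [List.pairwise_map]
    refine hp.imp_of_mem ?_
    intro a b ha hb hba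
    have := (digitChar_le_iff b a (hlt b hb) (hlt a ha)).mp hba
    exact_mod_cast this

-- ===== VERDICT (by name: the statement is the Claim_ definition above) =====
theorem isDanjo_spec : Claim_equal_isDanjo := by
  intro num _dom
  unfold Spec_isDanjo
  by_cases h : num ≤ 0
  · have h0 : num.toNat = 0 := by omega
    have hd : digitsLoopA num [] = [] := by rw [digitsLoopA_eq, h0]; simp
    simp only [isDanjo, isDanjo_alt, if_pos h, hd, List.length_nil, Nat.cast_zero]
    rw [PySem.List.pyRange_one_eq_nil (by norm_num)]
    rfl
  · have h' : 0 < num := by omega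
    have hd := digitsLoopA_eq num []
    simp only [List.nil_append] at hd
    have hscan := checkA_range (digitsLoopA num []) 0
    simp only [Nat.cast_zero, List.drop_zero] at hscan
    simp only [isDanjo, isDanjo_alt, if_neg h]
    rw [hscan, hd, PySem.Int.toList_toStr, toChars_pos num h']
    rw [digits_key num.toNat]
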